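-- pv_equiv track=rewrite | github.com/hanjinliu/cylindra | docs/scripts/_dynamic_doc.py | _replace_codes
-- ===== SOURCE A (Python) =====
-- def _replace_codes(docstring: str):
--     lines = docstring.split("\n")
--     is_code = False
--     for i in range(len(lines)):
--         if is_code:
--             if lines[i].startswith((">>> ", "... ")):
--                 lines[i] = lines[i][4:]
--             else:
--                 is_code = False
--                 lines[i] = f"```\n{lines[i]}"
--         else:
--             if lines[i].startswith(">>> "):
--                 lines[i] = f"``` python\n{lines[i][4:]}"
--                 is_code = True
--     return "\n".join(lines)
-- ===== SOURCE B (Python) =====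
-- def _replace_codes(docstring: str):
--     lines = docstring.split("\n")
--     n = len(lines)
--     out = []
--     i = 0
--     while i < n:
--         line = lines[i]
--         if line.startswith(">>> "):
--             out.append("``` python\n" + line[4:])
--             i += 1
--             while i < n and lines[i].startswith((">>> ", "... ")):
--                 out.append(lines[i][4:])
--                 i += 1
--             if i < n:
--                 out.append("```\n" + lines[i])
--                 i += 1
--         else:
--             out.append(line)
--             i += 1
--     return "\n".join(out)
-- ===== Notes on version B (the rewrite author's own statement) =====
-- stated objective: alternative
-- what changed: Replaces A's is_code boolean state machine that mutates the line list in place with an index loop that groups each code block via a nested inner loop appending to a fresh output list.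
import Mathlib
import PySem

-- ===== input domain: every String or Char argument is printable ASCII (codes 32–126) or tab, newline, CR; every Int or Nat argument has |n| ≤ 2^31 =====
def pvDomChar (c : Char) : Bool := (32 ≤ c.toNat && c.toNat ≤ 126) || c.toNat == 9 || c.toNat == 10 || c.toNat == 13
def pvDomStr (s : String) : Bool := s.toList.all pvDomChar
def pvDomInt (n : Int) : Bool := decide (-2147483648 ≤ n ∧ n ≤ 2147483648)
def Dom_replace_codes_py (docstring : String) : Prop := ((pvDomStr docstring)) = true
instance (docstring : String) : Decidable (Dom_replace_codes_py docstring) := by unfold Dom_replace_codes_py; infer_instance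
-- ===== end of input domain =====

-- B replaces A's is_code state machine (mutating lines in place) with an index loop that
-- groups each code block using a nested inner loop into a fresh output list (objective: alternative).

-- ===== PORT A =====
-- docstring.split("\n"): sep is the non-empty literal "\n", so PySem.Str.split? is always some; .getD [] only unwraps it
-- the for-i loop carrying is_code, rewriting lines[i] in place, becomes a recursion over the
-- lines carrying the is_code Bool and producing the rewritten lines
def replaceCodesAGo : Bool → List String → List String
  | _, [] => []
  | true, l :: ls =>
      if PySem.Str.startswith l ">>> " || PySem.Str.startswith l "... " then
        PySem.Str.slice l (some 4) none :: replaceCodesAGo true ls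
      else
        ("```\n" ++ l) :: replaceCodesAGo false ls
  | false, l :: ls =>
      if PySem.Str.startswith l ">>> " then
        ("``` python\n" ++ PySem.Str.slice l (some 4) none) :: replaceCodesAGo true ls
      else
        l :: replaceCodesAGo false ls

def replace_codes_py (docstring : String) : String :=
  PySem.Str.join "\n" (replaceCodesAGo false ((PySem.Str.split? docstring "\n").getD []))

-- ===== PORT B =====
-- Source B's outer while-i loop and its nested inner while loop; advancing i consumes the list
mutual
def replaceCodesBOuter : List String → List String
  | [] => []
  | l :: ls =>
      if PySem.Str.startswith l ">>> " then
        ("``` python\n" ++ PySem.Str.slice l (some 4) none) :: replaceCodesBInner ls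
      else
        l :: replaceCodesBOuter ls
def replaceCodesBInner : List String → List String
  | [] => []
  | l :: ls =>
      if PySem.Str.startswith l ">>> " || PySem.Str.startswith l "... " then
        PySem.Str.slice l (some 4) none :: replaceCodesBInner ls
      else
        ("```\n" ++ l) :: replaceCodesBOuter ls
end

def replace_codes_py_alt (docstring : String) : String :=
  PySem.Str.join "\n" (replaceCodesBOuter ((PySem.Str.split? docstring "\n").getD []))

-- ===== PRECONDITION & SPEC =====
def Spec_replace_codes_py (docstring : String) (out : String) : Prop := out = replace_codes_py_alt docstring
instance (docstring : String) (out : String) : Decidable (Spec_replace_codes_py docstring out) := by unfold Spec_replace_codes_py; infer_instance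

-- ===== CLAIM (what is proved, stated in full; the proofs are below) =====
def Claim_equal_replace_codes_py : Prop := ∀ (docstring : String), Dom_replace_codes_py docstring → Spec_replace_codes_py docstring (replace_codes_py docstring)

-- ===== LEMMAS AND PROOFS =====
theorem replaceCodesGo_eq (ls : List String) :
    replaceCodesAGo false ls = replaceCodesBOuter ls ∧
      replaceCodesAGo true ls = replaceCodesBInner ls := by
  induction ls with
  | nil => exact ⟨rfl, rfl⟩
  | cons l ls ih =>
    refine ⟨?_, ?_⟩ <;> simp only [replaceCodesAGo, replaceCodesBOuter, replaceCodesBInner] <;>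
      split_ifs <;> simp [ih.1, ih.2]

-- ===== VERDICT (by name: the statement is the Claim_ definition above) =====
theorem replace_codes_py_spec : Claim_equal_replace_codes_py := by
  intro docstring _
  unfold Spec_replace_codes_py replace_codes_py replace_codes_py_alt
  rw [(replaceCodesGo_eq _).1]
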